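-- pv_equiv track=rewrite | github.com/SYSPROG-JLS/S370BALEmulator | S370BALEmulator.py | cvt2scomp
-- ===== SOURCE A (Python) =====
-- def cvt2scomp(x):
--     #x in format: 'FFFFFFFFFFFFFFFD' (doubleword) or 'FFFFFFFD' (fullword) or 'FFFD' (halfword)
--     #convert x to binary string
--     b = bin(int(x,16))[2:]
--     if len(b) == 16:
--         b = b[0]*16 + b   #expand halfword by propagating the leftmost (sign) bit 16 positions to the left.
--     #flip the bits in b creating num1
--     num1 = ''
--     for bit in b:
--         if bit == '0':
--             num1 = num1 + '1'
--         else: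
--             num1 = num1 + '0'
--     return (int(num1,2) + int('0001',2)) * -1   #note: the 2 indicates base 2
-- ===== SOURCE B (Python) =====
-- def cvt2scomp(x):
--     # closed form: one's-complement-plus-one-then-negate of an L-bit string equals v - 2**L;
--     # A's 16->32 bit sign expansion does not change that value (v' - 2**32 == v - 2**16).
--     n = int(x, 16)
--     return n - (1 << max(n.bit_length(), 1))
-- ===== Notes on version B (the rewrite author's own statement) =====
-- stated objective: simpler
-- what changed: Replaces A's binary-string construction, halfword sign-extension and character flip loop by the closed form n - 2**max(n.bit_length(),1) (one's-complement-plus-one negation of an L-bit string is v - 2**L, and A's 16-to-32-bit expansion leaves that value unchanged).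
-- outside the precondition, e.g. on cvt2scomp('-5'): A returns -3, B returns -13
import Mathlib
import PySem

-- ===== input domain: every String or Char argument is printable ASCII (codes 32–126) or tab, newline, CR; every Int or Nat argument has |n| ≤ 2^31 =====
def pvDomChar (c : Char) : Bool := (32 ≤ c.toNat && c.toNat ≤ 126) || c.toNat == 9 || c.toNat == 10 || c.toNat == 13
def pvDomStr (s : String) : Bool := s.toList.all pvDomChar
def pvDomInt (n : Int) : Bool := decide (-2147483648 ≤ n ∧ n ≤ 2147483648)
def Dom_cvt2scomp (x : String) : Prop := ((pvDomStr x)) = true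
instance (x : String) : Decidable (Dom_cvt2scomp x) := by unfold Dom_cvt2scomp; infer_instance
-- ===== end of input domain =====

-- B replaces A's binary-string building, sign expansion and flip loop by the closed form
-- n - 2^max(bitlen n, 1); objective: simpler.

-- ===== PORT A =====
-- `int(num1, 2)`: A only ever applies it to nonempty strings of '0'/'1' characters (the flip
-- loop emits exactly those), where Python's int(s, 2) is the plain positional base-2 fold;
-- pvBinVal is that fold, exact on every such string.
def pvBinVal (ds : List Char) : Int :=
  ds.foldl (fun a c => 2 * a + (if c == '1' then 1 else 0)) 0

-- the flip loop of A: 'num1 = num1 + ("1" if bit == "0" else "0")'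
def pvFlip (b : List Char) : List Char :=
  b.foldl (fun num1 bit => num1 ++ [if bit == '0' then '1' else '0']) []

def cvt2scomp (x : String) : Int :=
  -- b = bin(int(x,16))[2:]
  let b := (PySem.Int.toBinChars0b ((PySem.Int.ofStrBase? x 16).getD 0)).drop 2
  -- if len(b) == 16: b = b[0]*16 + b
  let b := if PySem.List.len b == 16 then List.replicate 16 (PySem.List.pyGetD b 0 ' ') ++ b else b
  let num1 := pvFlip b
  (pvBinVal num1 + (PySem.Int.ofStrBase? "0001" 2).getD 0) * -1

-- ===== PORT B =====
def cvt2scomp_alt (x : String) : Int :=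
  let n := (PySem.Int.ofStrBase? x 16).getD 0
  n - (1 <<< max (PySem.Int.bitLength n) 1)

-- ===== PRECONDITION & SPEC =====
-- Pre_ excludes strings on which int(x,16) raises ValueError (A raises there too), and the
-- strings parsing to a NEGATIVE number: negative input is outside the hex-word purpose of the
-- function, the [2:] slice of Python's bin() leaves the letter of the sign prefix inside the
-- digit string fed to the flip loop, and neither A's nor B's value on such input is canonical,
-- so no one would specify either (see the cite in claim.json).
def Pre_cvt2scomp (x : String) : Prop := 0 ≤ (PySem.Int.ofStrBase? x 16).getD (-1)
instance (x : String) : Decidable (Pre_cvt2scomp x) := by unfold Pre_cvt2scomp; infer_instance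
def pvWitness_cvt2scomp : String := "FFFD"

def Spec_cvt2scomp (x : String) (out : Int) : Prop := out = cvt2scomp_alt x
instance (x : String) (out : Int) : Decidable (Spec_cvt2scomp x out) := by unfold Spec_cvt2scomp; infer_instance

-- ===== CLAIM (what is proved, stated in full; the proofs are below) =====
def Claim_equal_cvt2scomp : Prop := ∀ (x : String), Dom_cvt2scomp x → Pre_cvt2scomp x → Spec_cvt2scomp x (cvt2scomp x)

-- ===== LEMMAS AND PROOFS =====

-- binary digits of m, most significant first: the value of Nat.toDigits 2 m
def pvBin (m : Nat) : List Char :=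
  if _h : m < 2 then [Nat.digitChar m] else pvBin (m / 2) ++ [Nat.digitChar (m % 2)]
termination_by m
decreasing_by exact Nat.div_lt_self (by omega) (by omega)

theorem pvToDigitsCore_eq (f : Nat) : ∀ (m : Nat) (l : List Char), m < f →
    Nat.toDigitsCore 2 f m l = pvBin m ++ l := by
  induction f with
  | zero => intro m l h; omega
  | succ f ih =>
    intro m l h
    rw [pvBin]
    simp only [Nat.toDigitsCore]
    by_cases h2 : m < 2
    · have : m / 2 = 0 := by omega
      have : m % 2 = m := by omega
      simp [*]
    · have hne : ¬ m / 2 = 0 := by omega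
      simp only [dif_neg h2, if_neg hne]
      rw [ih (m / 2) _ (by omega)]
      simp

theorem pvToDigits_eq (m : Nat) : Nat.toDigits 2 m = pvBin m := by
  have := pvToDigitsCore_eq (m + 1) m [] (by omega)
  simpa [Nat.toDigits] using this

theorem pvDigitChar0 : Nat.digitChar 0 = '0' := by decide
theorem pvDigitChar1 : Nat.digitChar 1 = '1' := by decide

theorem pvBin_all (m : Nat) : ∀ c ∈ pvBin m, c = '0' ∨ c = '1' := by
  induction m using Nat.strong_induction_on with
  | _ m ih =>
    rw [pvBin]
    by_cases h : m < 2
    · interval_cases m <;> simp [pvDigitChar0, pvDigitChar1]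
    · simp only [dif_neg h, List.mem_append]
      intro c hc
      rcases hc with hc | hc
      · exact ih (m / 2) (Nat.div_lt_self (by omega) (by omega)) c hc
      · have h01 : m % 2 = 0 ∨ m % 2 = 1 := by omega
        rcases h01 with h01 | h01 <;> simp [h01, pvDigitChar0, pvDigitChar1] at hc <;> simp [hc]

theorem pvBin_head (m : Nat) (hm : 1 ≤ m) : ∃ t, pvBin m = '1' :: t := by
  induction m using Nat.strong_induction_on with
  | _ m ih =>
    rw [pvBin]
    by_cases h : m < 2
    · have : m = 1 := by omega
      subst this
      exact ⟨[], rfl⟩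
    · have hlt : m / 2 < m := Nat.div_lt_self (by omega) (by omega)
      obtain ⟨t, ht⟩ := ih (m / 2) hlt (by omega)
      refine ⟨t ++ [Nat.digitChar (m % 2)], ?_⟩
      rw [dif_neg h, ht]
      rfl

-- pulling the accumulator out of the base-2 fold
theorem pvFold_acc (ds : List Char) : ∀ (a : Int),
    ds.foldl (fun a c => 2 * a + (if c == '1' then 1 else 0)) a
      = a * 2 ^ ds.length + pvBinVal ds := by
  induction ds with
  | nil => intro a; simp [pvBinVal]
  | cons c t ih =>
    intro a
    simp only [List.foldl_cons, pvBinVal, List.length_cons]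
    rw [ih, ih]
    ring

theorem pvBinVal_cons (c : Char) (t : List Char) :
    pvBinVal (c :: t) = (if c == '1' then 1 else 0) * 2 ^ t.length + pvBinVal t := by
  simp only [pvBinVal, List.foldl_cons]
  rw [pvFold_acc]
  have h2 : (2 * (0:Int) + (if c == '1' then 1 else 0)) = (if c == '1' then (1:Int) else 0) := by ring
  rw [h2]
  rfl

theorem pvBinVal_append (l1 l2 : List Char) :
    pvBinVal (l1 ++ l2) = pvBinVal l1 * 2 ^ l2.length + pvBinVal l2 := by
  simp only [pvBinVal, List.foldl_append]
  rw [pvFold_acc]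
  rfl

theorem pvBin_val (m : Nat) : pvBinVal (pvBin m) = m := by
  induction m using Nat.strong_induction_on with
  | _ m ih =>
    rw [pvBin]
    by_cases h : m < 2
    · interval_cases m <;> simp [pvBinVal, pvDigitChar0, pvDigitChar1]
    · rw [dif_neg h, pvBinVal_append, ih (m / 2) (Nat.div_lt_self (by omega) (by omega))]
      have h01 : m % 2 = 0 ∨ m % 2 = 1 := by omega
      rcases h01 with h01 | h01 <;>
        rw [h01] <;> simp [pvBinVal, pvDigitChar0, pvDigitChar1] <;> omega

theorem pvBin_len (m : Nat) (hm : 1 ≤ m) :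
    (pvBin m).length = PySem.Int.bitLength (m : Int) := by
  induction m using Nat.strong_induction_on with
  | _ m ih =>
    rw [pvBin]
    by_cases h : m < 2
    · have : m = 1 := by omega
      subst this
      rw [PySem.Int.bitLength_natCast (show (0:Nat) < 1 by omega)]
      simp
    · rw [dif_neg h]
      rw [PySem.Int.bitLength_natCast (show 0 < m by omega)]
      have := ih (m / 2) (Nat.div_lt_self (by omega) (by omega)) (by omega)
      simp [this]

theorem pvBin_zero : pvBin 0 = ['0'] := by rw [pvBin]; simp [pvDigitChar0]

theorem pvFlip_eq_map (b : List Char) :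
    pvFlip b = b.map (fun c => if c == '0' then '1' else '0') := by
  unfold pvFlip
  rw [PySem.List.foldl_append_singleton_eq_map]
  simp

theorem pvFlip_val (b : List Char) (hb : ∀ c ∈ b, c = '0' ∨ c = '1') :
    pvBinVal (pvFlip b) = 2 ^ b.length - 1 - pvBinVal b := by
  rw [pvFlip_eq_map]
  induction b with
  | nil => simp [pvBinVal]
  | cons c t ih =>
    simp only [List.map_cons, pvBinVal_cons, List.length_map, List.length_cons]
    rw [ih (fun c hc => hb c (List.mem_cons_of_mem _ hc))]
    rcases hb c (List.mem_cons_self) with h | h <;> subst h <;> simp <;> ring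

-- the heart of the equivalence, stated over the parsed value
theorem pvCore (m : Nat) :
    (let b := (PySem.Int.toBinChars0b (m : Int)).drop 2
     let b := if PySem.List.len b == 16 then List.replicate 16 (PySem.List.pyGetD b 0 ' ') ++ b else b
     (pvBinVal (pvFlip b) + (PySem.Int.ofStrBase? "0001" 2).getD 0) * -1)
      = (m : Int) - (1 <<< max (PySem.Int.bitLength (m : Int)) 1) := by
  have hb2 : (PySem.Int.toBinChars0b (m : Int)).drop 2 = pvBin m := by
    rw [PySem.Int.toBinChars0b, if_neg (by omega), pvToDigits_eq]
    simp
  have hone : (PySem.Int.ofStrBase? "0001" 2).getD 0 = 1 := by decide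
  simp only [hb2, hone]
  by_cases hL : (pvBin m).length = 16
  · -- halfword: m ≥ 1, head is '1', value is unchanged by the expansion
    have hm1 : 1 ≤ m := by
      by_contra h
      have : m = 0 := by omega
      subst this
      rw [pvBin_zero] at hL
      simp at hL
    obtain ⟨t, ht⟩ := pvBin_head m hm1
    have hguard : (PySem.List.len (pvBin m) == 16) = true := by
      simp [PySem.List.len_eq, hL]
    have hget : PySem.List.pyGetD (pvBin m) 0 ' ' = '1' := by
      rw [ht]; exact PySem.List.pyGetD_zero_cons '1' t ' '
    simp only [hguard, if_true, hget]
    have hall : ∀ c ∈ List.replicate 16 '1' ++ pvBin m, c = '0' ∨ c = '1' := by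
      intro c hc
      rcases List.mem_append.mp hc with hc | hc
      · right; exact List.eq_of_mem_replicate hc
      · exact pvBin_all m c hc
    rw [pvFlip_val _ hall, pvBinVal_append, pvBin_val]
    have hrep : pvBinVal (List.replicate 16 '1') = 65535 := by decide
    have hlen : (List.replicate 16 '1' ++ pvBin m).length = 32 := by
      simp [hL]
    have hbl : PySem.Int.bitLength (m : Int) = 16 := by
      rw [← pvBin_len m hm1, hL]
    rw [hlen, hrep, hL, hbl]
    have hsh : (1 <<< max 16 1 : Nat) = 65536 := by decide
    rw [hsh]
    push_cast
    ring
  · have hguard : (PySem.List.len (pvBin m) == 16) = false := by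
      simp only [PySem.List.len_eq, beq_eq_false_iff_ne, ne_eq]
      intro hc
      exact hL (by exact_mod_cast hc)
    simp only [hguard, Bool.false_eq_true, if_false]
    rw [pvFlip_val _ (pvBin_all m), pvBin_val]
    by_cases hm0 : m = 0
    · subst hm0
      rw [pvBin_zero]
      decide
    · have hbl : PySem.Int.bitLength (m : Int) = (pvBin m).length :=
        (pvBin_len m (by omega)).symm
      rw [hbl]
      have h1 : 1 ≤ (pvBin m).length := by
        rcases pvBin_head m (by omega) with ⟨t, ht⟩
        simp [ht]
      rw [max_eq_left h1, Nat.one_shiftLeft]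
      push_cast
      ring

-- ===== VERDICT (by name: the statement is the Claim_ definition above) =====
theorem cvt2scomp_spec : Claim_equal_cvt2scomp := by
  intro x _ hpre
  unfold Spec_cvt2scomp cvt2scomp cvt2scomp_alt
  unfold Pre_cvt2scomp at hpre
  cases hparse : PySem.Int.ofStrBase? x 16 with
  | none => rw [hparse] at hpre; simp at hpre
  | some n =>
    rw [hparse] at hpre
    simp only [Option.getD_some] at hpre ⊢
    obtain ⟨m, rfl⟩ : ∃ m : Nat, n = (m : Int) := ⟨n.toNat, (Int.toNat_of_nonneg hpre).symm⟩
    exact pvCore m
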